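-- pv_equiv track=rewrite | github.com/KFClpy/KFC | test2/main.py | judge_num_connect_max
-- ===== SOURCE A (Python) =====
-- def judge_num_connect_max(num_list):
--     count=0
--     max=num_list[1][0]
--     while count<len(num_list[1])-4:
--         if num_list[1][count] == num_list[1][count + 1] + 1 and num_list[1][count + 1] == num_list[1][count + 2] + 1 and num_list[1][count + 2] == num_list[1][count + 3] + 1 and num_list[1][count + 3] == num_list[1][count + 4] + 1:
--             max=num_list[1][count]
--         count+=1
--     return max
-- ===== SOURCE B (Python) =====
-- def judge_num_connect_max(num_list):
--     row = num_list[1]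
--     n = len(row)
--     adj = [row[i] == row[i + 1] + 1 for i in range(n - 1)]
--     for c in range(n - 5, -1, -1):
--         if adj[c] and adj[c + 1] and adj[c + 2] and adj[c + 3]:
--             return row[c]
--     return row[0]
-- ===== Notes on version B (the rewrite author's own statement) =====
-- stated objective: alternative
-- what changed: Precomputes a boolean adjacency list of descending steps once and scans window starts in reverse, returning at the first (i.e. last) start of four consecutive True flags, instead of a forward while-loop re-testing a five-element compound condition and overwriting an accumulator.
import Mathlib
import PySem

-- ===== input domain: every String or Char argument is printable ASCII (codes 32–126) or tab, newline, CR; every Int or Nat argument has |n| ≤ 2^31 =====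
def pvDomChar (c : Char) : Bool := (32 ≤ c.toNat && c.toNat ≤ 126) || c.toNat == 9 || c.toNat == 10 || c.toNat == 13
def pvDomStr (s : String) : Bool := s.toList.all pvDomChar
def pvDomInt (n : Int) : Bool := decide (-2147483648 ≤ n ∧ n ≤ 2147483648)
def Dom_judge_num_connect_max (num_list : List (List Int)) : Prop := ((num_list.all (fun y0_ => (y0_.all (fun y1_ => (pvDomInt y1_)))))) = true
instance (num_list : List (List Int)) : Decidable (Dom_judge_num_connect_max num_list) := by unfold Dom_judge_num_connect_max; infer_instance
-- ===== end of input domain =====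

-- ===== PORT A =====
-- B precomputes an adjacency list and scans window starts in reverse; alternative decomposition, same cost.
-- Pre_ excludes inputs where Python A raises IndexError (fewer than two rows, or an empty second row).
-- A: while-loop over count, overwriting `max` whenever the five-element descending condition holds.
-- In-range non-negative Python indexing is ported with List.getD (exact inside Pre_).
def judge_num_connect_max (num_list : List (List Int)) : Int :=
  let row := (PySem.List.pyGet? num_list 1).getD []
  (List.range (row.length - 4)).foldl
    (fun m c =>
      if row.getD c 0 = row.getD (c + 1) 0 + 1 ∧ row.getD (c + 1) 0 = row.getD (c + 2) 0 + 1 ∧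
         row.getD (c + 2) 0 = row.getD (c + 3) 0 + 1 ∧ row.getD (c + 3) 0 = row.getD (c + 4) 0 + 1
      then row.getD c 0 else m)
    (row.getD 0 0)

-- ===== PORT B =====
-- B: adjacency flags built once; reverse scan over window starts, first hit returned, else row[0].
def judge_num_connect_max_alt (num_list : List (List Int)) : Int :=
  let row := (PySem.List.pyGet? num_list 1).getD []
  let adj := (List.range (row.length - 1)).map (fun i => decide (row.getD i 0 = row.getD (i + 1) 0 + 1))
  match (List.range (row.length - 4)).reverse.find?
      (fun c => adj.getD c false && adj.getD (c + 1) false && adj.getD (c + 2) false && adj.getD (c + 3) false) with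
  | some c => row.getD c 0
  | none => row.getD 0 0

-- ===== PRECONDITION & SPEC =====
-- A (and B) raise IndexError when num_list has fewer than two rows or the second row is empty.
def Pre_judge_num_connect_max (num_list : List (List Int)) : Prop :=
  2 ≤ num_list.length ∧ num_list.getD 1 [] ≠ []
instance (num_list : List (List Int)) : Decidable (Pre_judge_num_connect_max num_list) := by
  unfold Pre_judge_num_connect_max; infer_instance
def pvWitness_judge_num_connect_max : List (List Int) := [[0], [5, 4, 3, 2, 1]]
def Spec_judge_num_connect_max (num_list : List (List Int)) (out : Int) : Prop := out = judge_num_connect_max_alt num_list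
instance (num_list : List (List Int)) (out : Int) : Decidable (Spec_judge_num_connect_max num_list out) := by unfold Spec_judge_num_connect_max; infer_instance

-- ===== CLAIM (what is proved, stated in full; the proofs are below) =====
def Claim_equal_judge_num_connect_max : Prop := ∀ (num_list : List (List Int)), Dom_judge_num_connect_max num_list → Pre_judge_num_connect_max num_list → Spec_judge_num_connect_max num_list (judge_num_connect_max num_list)

-- ===== LEMMAS AND PROOFS =====

-- "keep the last hit" fold equals "find first hit in reverse".
lemma foldl_pick (p : Nat → Bool) (f : Nat → Int) (l : List Nat) (init : Int) :
    l.foldl (fun m c => if p c then f c else m) init =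
      (match l.reverse.find? p with
       | some c => f c
       | none => init) := by
  induction l generalizing init with
  | nil => simp
  | cons a l ih =>
    simp only [List.foldl_cons, ih, List.reverse_cons, List.find?_append]
    cases h : l.reverse.find? p with
    | some c => simp
    | none =>
      simp [List.find?_singleton]
      by_cases hp : p a <;> simp [hp]

lemma adj_getD (row : List Int) (i : Nat) (hi : i < row.length - 1) :
    ((List.range (row.length - 1)).map
        (fun i => decide (row.getD i 0 = row.getD (i + 1) 0 + 1))).getD i false
      = decide (row.getD i 0 = row.getD (i + 1) 0 + 1) := by
  simp [List.getD, hi]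

-- ===== VERDICT (by name: the statement is the Claim_ definition above) =====
theorem judge_num_connect_max_spec : Claim_equal_judge_num_connect_max := by
  intro num_list _ _
  unfold Spec_judge_num_connect_max judge_num_connect_max judge_num_connect_max_alt
  set row := (PySem.List.pyGet? num_list 1).getD [] with hrow
  simp only []
  rw [PySem.List.foldl_congr_mem (g :=
      (fun (m : Int) (c : Nat) =>
        if (((List.range (row.length - 1)).map
              (fun i => decide (row.getD i 0 = row.getD (i + 1) 0 + 1))).getD c false &&
            ((List.range (row.length - 1)).map
              (fun i => decide (row.getD i 0 = row.getD (i + 1) 0 + 1))).getD (c + 1) false &&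
            ((List.range (row.length - 1)).map
              (fun i => decide (row.getD i 0 = row.getD (i + 1) 0 + 1))).getD (c + 2) false &&
            ((List.range (row.length - 1)).map
              (fun i => decide (row.getD i 0 = row.getD (i + 1) 0 + 1))).getD (c + 3) false)
        then row.getD c 0 else m))]
  · exact foldl_pick _ (fun c => row.getD c 0) _ _
  · intro acc c hc
    rw [List.mem_range] at hc
    rw [adj_getD row c (by omega), adj_getD row (c + 1) (by omega),
        adj_getD row (c + 2) (by omega), adj_getD row (c + 3) (by omega)]
    simp [Bool.and_assoc]
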